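-- pv_equiv track=rewrite | github.com/flemouel/Social-Vehicular-Network | AppliSocial/fonction.py | communitiesList
-- ===== SOURCE A (Python) =====
-- def communitiesList(ListNodeCommunities):
-- 	community=ListNodeCommunities[0][1]
-- 	ListCommunities=[[]]
-- 	i=0
-- 	for Node in ListNodeCommunities:
-- 		if Node[1]==community:
-- 			ListCommunities[i].append(Node[0])
-- 		else:
-- 			i=i+1
-- 			community=Node[1]
-- 			ListCommunities.append([Node[0]])
-- 	return ListCommunities
-- ===== SOURCE B (Python) =====
-- def communitiesList(ListNodeCommunities):
--     groups = []
--     i = 0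
--     n = len(ListNodeCommunities)
--     while i < n:
--         label = ListNodeCommunities[i][1]
--         j = i
--         while j < n and ListNodeCommunities[j][1] == label:
--             j += 1
--         groups.append([node for node, _ in ListNodeCommunities[i:j]])
--         i = j
--     return groups
-- ===== Notes on version B (the rewrite author's own statement) =====
-- stated objective: alternative
-- what changed: Replaces A's running community label, group index i and append-to-last-group mutation with two-pointer run detection: scan ahead to the end of each run of equal labels and emit the whole group at once.
import Mathlib
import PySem

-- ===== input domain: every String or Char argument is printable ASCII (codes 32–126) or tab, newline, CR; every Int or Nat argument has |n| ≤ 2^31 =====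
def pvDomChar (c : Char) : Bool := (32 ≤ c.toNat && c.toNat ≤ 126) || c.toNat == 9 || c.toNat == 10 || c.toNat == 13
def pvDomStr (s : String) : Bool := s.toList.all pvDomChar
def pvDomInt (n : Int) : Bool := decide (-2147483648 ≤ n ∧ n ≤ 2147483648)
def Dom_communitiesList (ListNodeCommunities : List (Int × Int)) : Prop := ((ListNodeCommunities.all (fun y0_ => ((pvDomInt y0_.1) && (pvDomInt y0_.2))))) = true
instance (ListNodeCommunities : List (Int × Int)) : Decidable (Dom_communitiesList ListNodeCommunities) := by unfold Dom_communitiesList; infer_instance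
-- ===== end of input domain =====

-- B groups consecutive equal labels by scanning each run to its end (two pointers); A keeps a
-- running label, a group index i and appends into the last group. Equivalence is on Pre_ (nonempty).

-- ===== PORT A =====
-- A's for-loop: state = (community, ListCommunities, i); ListCommunities[i].append(x) = set i.
def communitiesListLoop : List (Int × Int) → Int → List (List Int) → Nat → List (List Int)
  | [], _, acc, _ => acc
  | (a, b) :: rest, community, acc, i =>
      if b == community then
        communitiesListLoop rest community (acc.set i ((acc.getD i []) ++ [a])) i
      else
        communitiesListLoop rest b (acc ++ [[a]]) (i + 1)

-- 'ListNodeCommunities[0][1]' raises IndexError on []: that input is excluded by Pre_ below.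
def communitiesList (ListNodeCommunities : List (Int × Int)) : List (List Int) :=
  match ListNodeCommunities with
  | [] => []
  | (a, b) :: rest => communitiesListLoop ((a, b) :: rest) b [[]] 0

-- ===== PORT B =====
-- B's outer while loop: take the run of nodes sharing the head's label, emit it, recurse on the rest.
def communitiesListRuns : List (Int × Int) → List (List Int)
  | [] => []
  | (a, b) :: rest =>
      ((a, b) :: rest.takeWhile (fun p => p.2 == b)).map Prod.fst
        :: communitiesListRuns (rest.dropWhile (fun p => p.2 == b))
  termination_by l => l.length
  decreasing_by
    simp only [List.length_cons]
    exact Nat.lt_succ_of_le (List.length_dropWhile_le _ _)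

def communitiesList_alt (ListNodeCommunities : List (Int × Int)) : List (List Int) :=
  communitiesListRuns ListNodeCommunities

-- ===== PRECONDITION & SPEC =====
-- Pre_ excludes only the empty list, on which A raises IndexError.
def Pre_communitiesList (ListNodeCommunities : List (Int × Int)) : Prop :=
  ListNodeCommunities ≠ []
instance (ListNodeCommunities : List (Int × Int)) : Decidable (Pre_communitiesList ListNodeCommunities) := by unfold Pre_communitiesList; infer_instance

def pvWitness_communitiesList : (List (Int × Int)) := [(1, 2), (3, 2), (4, 5)]

def Spec_communitiesList (ListNodeCommunities : List (Int × Int)) (out : List (List Int)) : Prop := out = communitiesList_alt ListNodeCommunities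
instance (ListNodeCommunities : List (Int × Int)) (out : List (List Int)) : Decidable (Spec_communitiesList ListNodeCommunities out) := by unfold Spec_communitiesList; infer_instance

-- ===== CLAIM (what is proved, stated in full; the proofs are below) =====
def Claim_equal_communitiesList : Prop := ∀ (ListNodeCommunities : List (Int × Int)), Dom_communitiesList ListNodeCommunities → Pre_communitiesList ListNodeCommunities → Spec_communitiesList ListNodeCommunities (communitiesList ListNodeCommunities)

-- ===== LEMMAS AND PROOFS =====

-- Abstract version of A's loop: the finished groups are never touched again, only the
-- current group 'cur' grows; 'consume' records exactly that.
def consume : List (Int × Int) → Int → List Int → List (List Int)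
  | [], _, cur => [cur]
  | (a, b) :: rest, community, cur =>
      if b == community then consume rest community (cur ++ [a])
      else cur :: consume rest b [a]

lemma loopA_eq_consume (l : List (Int × Int)) :
    ∀ (community : Int) (pre : List (List Int)) (cur : List Int),
      communitiesListLoop l community (pre ++ [cur]) pre.length = pre ++ consume l community cur := by
  induction l with
  | nil => intro c pre cur; simp [communitiesListLoop, consume]
  | cons hd tl ih =>
    intro c pre cur
    obtain ⟨a, b⟩ := hd
    by_cases h : b == c
    · have hget : (pre ++ [cur]).getD pre.length [] = cur := by
        simp [List.getD]
      have hset : (pre ++ [cur]).set pre.length (cur ++ [a]) = pre ++ [cur ++ [a]] := by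
        simp
      simp only [communitiesListLoop, consume, h, if_pos, hget, hset]
      exact ih c pre (cur ++ [a])
    · simp only [communitiesListLoop, consume, h, if_neg, Bool.false_eq_true, not_false_iff]
      have : pre ++ [cur] ++ [[a]] = (pre ++ [cur]) ++ [[a]] := rfl
      calc communitiesListLoop tl b (pre ++ [cur] ++ [[a]]) (pre.length + 1)
          = communitiesListLoop tl b ((pre ++ [cur]) ++ [[a]]) (pre ++ [cur]).length := by
            simp
        _ = (pre ++ [cur]) ++ consume tl b [a] := ih b (pre ++ [cur]) [a]
        _ = pre ++ (cur :: consume tl b [a]) := by simp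

lemma consume_eq_runs (l : List (Int × Int)) :
    ∀ (community : Int) (cur : List Int),
      consume l community cur
        = (cur ++ (l.takeWhile (fun p => p.2 == community)).map Prod.fst)
            :: communitiesListRuns (l.dropWhile (fun p => p.2 == community)) := by
  induction l with
  | nil => intro c cur; simp [consume, communitiesListRuns]
  | cons hd tl ih =>
    intro c cur
    obtain ⟨a, b⟩ := hd
    by_cases h : b == c
    · have hc : (b : Int) = c := by simpa using h
      simp only [consume, h, if_pos, List.takeWhile_cons, List.dropWhile_cons]
      simp only [hc]
      rw [ih c (cur ++ [a])]
      simp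
    · simp only [consume, h, if_neg, Bool.false_eq_true, not_false_iff,
        List.takeWhile_cons, List.dropWhile_cons]
      have hb : ((b : Int) == c) = false := by simpa using h
      simp only [List.map_nil, List.append_nil]
      rw [ih b [a]]
      simp [communitiesListRuns]

-- ===== VERDICT (by name: the statement is the Claim_ definition above) =====
theorem communitiesList_spec : Claim_equal_communitiesList := by
  intro l _ hpre
  unfold Spec_communitiesList
  match l with
  | [] => exact absurd rfl hpre
  | (a, b) :: rest =>
    show communitiesListLoop ((a, b) :: rest) b [[]] 0 = communitiesList_alt ((a, b) :: rest)
    have h0 : communitiesListLoop ((a, b) :: rest) b ([] ++ [[]]) ([] : List (List Int)).length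
        = [] ++ consume ((a, b) :: rest) b [] := loopA_eq_consume _ b [] []
    simp only [List.nil_append, List.length_nil] at h0
    rw [h0]
    show consume ((a, b) :: rest) b [] = communitiesListRuns ((a, b) :: rest)
    simp only [consume, beq_self_eq_true, if_pos, List.nil_append]
    rw [consume_eq_runs rest b [a]]
    simp [communitiesListRuns]
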